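-- pv_equiv track=rewrite | github.com/leechristie/advent-of-code-2023 | aoc23py/day06.py | last_postive_near_slope_down
-- ===== SOURCE A (Python) =====
-- def lead_distance(hold_time: int, time: int, distance: int) -> int:
--     return - hold_time ** 2 + time * hold_time - distance
--
-- def last_postive_near_slope_down(hold_time: int, time: int, distance: int) -> int:
--     current = lead_distance(hold_time, time, distance)
--     if current < 0:
--         while current < 0:
--             hold_time -= 1
--             current = lead_distance(hold_time, time, distance)
--         return hold_time
--     else:
--         while current >= 0:
--             hold_time += 1
--             current = lead_distance(hold_time, time, distance)
--         return hold_time - 1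
-- ===== SOURCE B (Python) =====
-- def last_postive_near_slope_down(hold_time: int, time: int, distance: int) -> int:
--     # Closed form: the answer is floor((time + sqrt(time^2 - 4*distance)) / 2),
--     # computed exactly with a binary-search integer square root.
--     disc = time * time - 4 * distance
--     lo, hi = 0, disc + 1
--     while hi - lo > 1:
--         mid = (lo + hi) // 2
--         if mid * mid <= disc:
--             lo = mid
--         else:
--             hi = mid
--     return (time + lo) // 2
-- ===== Notes on version B (the rewrite author's own statement) =====
-- stated objective: faster
-- what changed: Replaces A's unit-step walk of hold_time toward the root of -h^2+t*h-d with the closed form floor((t+sqrt(t^2-4d))/2), computing the integer square root by binary search.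
-- outside the precondition, e.g. on last_postive_near_slope_down(0, 0, 1): A does not finish within the time limit, B returns 0
import Mathlib
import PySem

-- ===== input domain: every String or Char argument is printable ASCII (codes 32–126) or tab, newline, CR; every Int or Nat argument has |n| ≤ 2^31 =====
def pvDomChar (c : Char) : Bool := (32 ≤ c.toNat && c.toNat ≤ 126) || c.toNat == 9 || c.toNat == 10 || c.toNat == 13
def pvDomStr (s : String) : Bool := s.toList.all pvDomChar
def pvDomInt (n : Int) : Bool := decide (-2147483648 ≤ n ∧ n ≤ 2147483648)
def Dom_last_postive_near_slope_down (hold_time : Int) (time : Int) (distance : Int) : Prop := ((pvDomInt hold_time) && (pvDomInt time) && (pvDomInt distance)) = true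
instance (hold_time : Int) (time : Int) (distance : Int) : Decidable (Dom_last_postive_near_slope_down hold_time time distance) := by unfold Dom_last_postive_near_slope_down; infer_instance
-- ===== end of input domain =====

-- B replaces A's unit-step linear walk to the root by an O(log) closed form:
-- floor((time + isqrt(time^2-4*distance))/2), isqrt by binary search.

-- ===== PORT A =====
def pvLead (hold_time time distance : Int) : Int :=
  -(hold_time ^ 2) + time * hold_time - distance

-- A's 'while current < 0: hold_time -= 1'; fuel only makes the loop total
-- (provably sufficient under Pre_, where the Python loop terminates).
def pvLoopDown (fuel : Nat) (h t d : Int) : Int :=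
  match fuel with
  | 0 => h
  | f + 1 => if pvLead h t d < 0 then pvLoopDown f (h - 1) t d else h

-- A's 'while current >= 0: hold_time += 1'
def pvLoopUp (fuel : Nat) (h t d : Int) : Int :=
  match fuel with
  | 0 => h
  | f + 1 => if 0 ≤ pvLead h t d then pvLoopUp f (h + 1) t d else h

def pvFuelA (h t d : Int) : Nat := h.natAbs + t.natAbs + d.natAbs + 4

def last_postive_near_slope_down (hold_time : Int) (time : Int) (distance : Int) : Int :=
  let current := pvLead hold_time time distance
  if current < 0 then
    pvLoopDown (pvFuelA hold_time time distance) hold_time time distance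
  else
    pvLoopUp (pvFuelA hold_time time distance) hold_time time distance - 1

-- ===== PORT B =====
-- Source B's binary-search integer square root: invariant lo*lo ≤ n < hi*hi;
-- fuel only makes the while-loop total (hi - lo shrinks every iteration,
-- so fuel = (hi - lo) at the call site is provably sufficient).
def pvIsqrtLoop (fuel : Nat) (n lo hi : Int) : Int :=
  match fuel with
  | 0 => lo
  | f + 1 =>
    if 1 < hi - lo then
      if (PySem.Int.floordiv (lo + hi) 2) * (PySem.Int.floordiv (lo + hi) 2) ≤ n then
        pvIsqrtLoop f n (PySem.Int.floordiv (lo + hi) 2) hi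
      else
        pvIsqrtLoop f n lo (PySem.Int.floordiv (lo + hi) 2)
    else lo

def last_postive_near_slope_down_alt (hold_time : Int) (time : Int) (distance : Int) : Int :=
  let disc := time * time - 4 * distance
  PySem.Int.floordiv (time + pvIsqrtLoop (disc + 1).toNat disc 0 (disc + 1)) 2

-- ===== PRECONDITION & SPEC =====
-- Pre_ excludes exactly the inputs where Python A loops forever (no integer
-- crossing is reachable in the direction A walks): A returns on an input iff
-- lead(hold_time) ≥ 0, or hold_time is right of the vertex and the
-- discriminant admits a real root.
def Pre_last_postive_near_slope_down (hold_time : Int) (time : Int) (distance : Int) : Prop :=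
  0 ≤ -(hold_time * hold_time) + time * hold_time - distance ∨
    (time < 2 * hold_time ∧ 0 ≤ time * time - 4 * distance)
instance (hold_time : Int) (time : Int) (distance : Int) : Decidable (Pre_last_postive_near_slope_down hold_time time distance) := by unfold Pre_last_postive_near_slope_down; infer_instance

def pvWitness_last_postive_near_slope_down : Int × Int × Int := (5, 10, 20)

def Spec_last_postive_near_slope_down (hold_time : Int) (time : Int) (distance : Int) (out : Int) : Prop := out = last_postive_near_slope_down_alt hold_time time distance
instance (hold_time : Int) (time : Int) (distance : Int) (out : Int) : Decidable (Spec_last_postive_near_slope_down hold_time time distance out) := by unfold Spec_last_postive_near_slope_down; infer_instance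

-- ===== CLAIM (what is proved, stated in full; the proofs are below) =====
def Claim_equal_last_postive_near_slope_down : Prop := ∀ (hold_time : Int) (time : Int) (distance : Int), Dom_last_postive_near_slope_down hold_time time distance → Pre_last_postive_near_slope_down hold_time time distance → Spec_last_postive_near_slope_down hold_time time distance (last_postive_near_slope_down hold_time time distance)

-- ===== LEMMAS AND PROOFS =====

lemma pvFdiv2_bounds (x : Int) :
    2 * PySem.Int.floordiv x 2 ≤ x ∧ x ≤ 2 * PySem.Int.floordiv x 2 + 1 := by
  have h2 := PySem.Int.floordiv_mul_add_mod x 2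
  have h1 : PySem.Int.mod x 2 = x % 2 := PySem.Int.mod_eq_emod_of_pos (by norm_num)
  omega

lemma pvIsqrtLoop_spec :
    ∀ (k : Nat) (n lo hi : Int), (hi - lo).toNat ≤ k + 1 → 0 ≤ lo →
      lo * lo ≤ n → n < hi * hi → lo < hi →
      0 ≤ pvIsqrtLoop k n lo hi ∧ pvIsqrtLoop k n lo hi * pvIsqrtLoop k n lo hi ≤ n ∧
        n < (pvIsqrtLoop k n lo hi + 1) * (pvIsqrtLoop k n lo hi + 1) := by
  intro k
  induction k with
  | zero =>
    intro n lo hi hk hlo h1 h2 hlh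
    have : hi = lo + 1 := by omega
    subst this
    exact ⟨hlo, h1, h2⟩
  | succ k ih =>
    intro n lo hi hk hlo h1 h2 hlh
    rw [pvIsqrtLoop]
    by_cases hgt : 1 < hi - lo
    · have hb := pvFdiv2_bounds (lo + hi)
      set mid := PySem.Int.floordiv (lo + hi) 2 with hmid
      have hmlo : lo < mid := by omega
      have hmhi : mid < hi := by omega
      simp only [hgt, if_pos]
      by_cases hle : mid * mid ≤ n
      · simp only [hle, if_pos]
        exact ih n mid hi (by omega) (by omega) hle h2 hmhi
      · simp only [hle, if_neg, not_false_iff]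
        exact ih n lo mid (by omega) hlo h1 (by omega) hmlo
    · simp only [hgt, if_neg, not_false_iff]
      have : hi = lo + 1 := by omega
      subst this
      exact ⟨hlo, h1, h2⟩

lemma pvLoopDown_eq (t d s a : Int) (hs : 0 ≤ s)
    (h1 : s * s ≤ t * t - 4 * d) (h2 : t * t - 4 * d < (s + 1) * (s + 1))
    (ha1 : 2 * a ≤ t + s) (ha2 : t + s ≤ 2 * a + 1) :
    ∀ (fuel : Nat) (h : Int), a ≤ h → (h - a).toNat < fuel →
      pvLoopDown fuel h t d = a := by
  intro fuel
  induction fuel with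
  | zero => intro h _ hf; omega
  | succ f ih =>
    intro h hah hf
    by_cases hcase : a < h
    · have hlt : pvLead h t d < 0 := by
        have e : 4 * pvLead h t d = (t * t - 4 * d) - (2 * h - t) * (2 * h - t) := by
          unfold pvLead; ring
        have hstep : s + 1 ≤ 2 * h - t := by omega
        nlinarith
      simp only [pvLoopDown, hlt, if_pos]
      exact ih (h - 1) (by omega) (by omega)
    · have hha : h = a := by omega
      subst hha
      have hge : ¬ pvLead h t d < 0 := by
        have e : 4 * pvLead h t d = (t * t - 4 * d) - (2 * h - t) * (2 * h - t) := by
          unfold pvLead; ring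
        rcases (by omega : 2 * h - t = s ∨ 2 * h - t = s - 1) with hc | hc
        · nlinarith
        · rcases (by omega : 1 ≤ s ∨ s = 0) with hs1 | hs0
          · nlinarith
          · -- s = 0 forces disc = 0 while t is odd: impossible
            have hD0 : t * t - 4 * d = 0 := by
              rw [hs0] at h1 h2; linarith
            have ht : t = 2 * h + 1 := by omega
            rw [ht] at hD0
            have h4 : (4 : Int) * (h * h + h - d) + 1 = 0 := by linear_combination hD0
            obtain ⟨m, hm⟩ : ∃ m : Int, m = h * h + h - d := ⟨_, rfl⟩
            rw [← hm] at h4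
            omega
      simp only [pvLoopDown]
      rw [if_neg hge]

lemma pvLoopUp_eq (t d s a : Int) (hs : 0 ≤ s)
    (h1 : s * s ≤ t * t - 4 * d) (h2 : t * t - 4 * d < (s + 1) * (s + 1))
    (ha1 : 2 * a ≤ t + s) (ha2 : t + s ≤ 2 * a + 1) :
    ∀ (fuel : Nat) (h : Int), -s ≤ 2 * h - t → h ≤ a + 1 → (a + 1 - h).toNat < fuel →
      pvLoopUp fuel h t d = a + 1 := by
  intro fuel
  induction fuel with
  | zero => intro h _ _ hf; omega
  | succ f ih =>
    intro h hinv hha hf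
    by_cases hcase : h ≤ a
    · have hge : 0 ≤ pvLead h t d := by
        have e : 4 * pvLead h t d = (t * t - 4 * d) - (2 * h - t) * (2 * h - t) := by
          unfold pvLead; ring
        have hub : 2 * h - t ≤ s := by omega
        nlinarith
      simp only [pvLoopUp, hge, if_pos]
      exact ih (h + 1) (by omega) (by omega) (by omega)
    · have hha1 : h = a + 1 := by omega
      have hlt : ¬ 0 ≤ pvLead h t d := by
        have e : 4 * pvLead h t d = (t * t - 4 * d) - (2 * h - t) * (2 * h - t) := by
          unfold pvLead; ring
        have hstep : s + 1 ≤ 2 * h - t := by omega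
        simp only [not_le]
        nlinarith
      simp only [pvLoopUp]
      rw [if_neg hlt]
      exact hha1

lemma pvNatAbs_sq (t : Int) : (t.natAbs : Int) * (t.natAbs : Int) = t * t := by
  exact_mod_cast Int.natAbs_mul_self' t

-- ===== VERDICT (by name: the statement is the Claim_ definition above) =====
theorem last_postive_near_slope_down_spec : Claim_equal_last_postive_near_slope_down := by
  intro h t d _ hPre
  unfold Spec_last_postive_near_slope_down last_postive_near_slope_down
  unfold last_postive_near_slope_down_alt
  have hdisc : 0 ≤ t * t - 4 * d := by
    rcases hPre with hp | hp
    · nlinarith [sq_nonneg (2 * h - t)]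
    · exact hp.2
  have hisq := pvIsqrtLoop_spec (t * t - 4 * d + 1).toNat (t * t - 4 * d) 0 (t * t - 4 * d + 1)
      (by omega) le_rfl (by simpa using hdisc) (by nlinarith) (by omega)
  set s := pvIsqrtLoop (t * t - 4 * d + 1).toNat (t * t - 4 * d) 0 (t * t - 4 * d + 1) with hsdef
  obtain ⟨hs0, hs1, hs2⟩ := hisq
  have hb := pvFdiv2_bounds (t + s)
  set a := PySem.Int.floordiv (t + s) 2 with hadef
  have ha1 : 2 * a ≤ t + s := hb.1
  have ha2 : t + s ≤ 2 * a + 1 := hb.2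
  by_cases hneg : pvLead h t d < 0
  · -- A walks down to a
    have hlead : pvLead h t d = -(h * h) + t * h - d := by unfold pvLead; ring
    have hp2 : t < 2 * h := by
      rcases hPre with hp | hp
      · exfalso; rw [hlead] at hneg; omega
      · exact hp.1
    have hah : a < h := by
      by_contra hcon
      push_neg at hcon
      have e : 4 * pvLead h t d = (t * t - 4 * d) - (2 * h - t) * (2 * h - t) := by
        unfold pvLead; ring
      have hub : 2 * h - t ≤ s := by omega
      have hlb : 0 < 2 * h - t := by omega
      nlinarith
    simp only [hneg, if_pos]
    exact pvLoopDown_eq t d s a hs0 hs1 hs2 ha1 ha2 _ h (by omega)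
      (by unfold pvFuelA; omega)
  · -- A walks up to a+1 and returns a
    have e : 4 * pvLead h t d = (t * t - 4 * d) - (2 * h - t) * (2 * h - t) := by
      unfold pvLead; ring
    push_neg at hneg
    have habs : 2 * h - t ≤ s ∧ -s ≤ 2 * h - t := by
      constructor <;> nlinarith
    have hsb : s ≤ (t.natAbs : Int) + (d.natAbs : Int) + 1 := by
      have h1 : (t.natAbs : Int) * (t.natAbs : Int) = t * t := pvNatAbs_sq t
      have h2 : -d ≤ (d.natAbs : Int) := by omega
      have h3 : (0 : Int) ≤ t.natAbs := by positivity
      have h4 : (0 : Int) ≤ d.natAbs := by positivity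
      nlinarith
    have hne : ¬ pvLead h t d < 0 := not_lt.mpr hneg
    simp only [hne, if_neg, not_false_iff]
    have := pvLoopUp_eq t d s a hs0 hs1 hs2 ha1 ha2 (pvFuelA h t d) h habs.2
      (by omega) (by unfold pvFuelA; omega)
    omega
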